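-- pv_equiv track=rewrite | github.com/theseus27/Coding-Challenges | CodeSignal/Missed Problems/lights.py | lights
-- ===== SOURCE A (Python) =====
-- def lights(radius, houses):
--     lights = 0
--     while houses:
--         lights += 1
--         position = houses[0] + radius
--         for i in reversed(houses):
--             if i >= position-radius and i <= position+radius:
--                 houses.remove(i)
--     return lights
-- ===== SOURCE B (Python) =====
-- def lights(radius, houses):
--     # Single forward pass: keep the positions where a light was placed and
--     # count a new light whenever the current house is not covered by one of them.
--     # (Does not mutate houses; A empties the list in place. Return value only.)
--     span = 2 * radius
--     chosen = []
--     for h in houses: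
--         if not any(c <= h <= c + span for c in chosen):
--             chosen.append(h)
--     return len(chosen)
-- ===== Notes on version B (the rewrite author's own statement) =====
-- stated objective: alternative
-- what changed: A repeatedly rescans and destructively removes covered houses (one pass per light placed); B makes a single forward pass over the unmodified list, keeping the list of chosen light positions and counting a house as a new light only when no chosen position covers it.
import Mathlib
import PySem

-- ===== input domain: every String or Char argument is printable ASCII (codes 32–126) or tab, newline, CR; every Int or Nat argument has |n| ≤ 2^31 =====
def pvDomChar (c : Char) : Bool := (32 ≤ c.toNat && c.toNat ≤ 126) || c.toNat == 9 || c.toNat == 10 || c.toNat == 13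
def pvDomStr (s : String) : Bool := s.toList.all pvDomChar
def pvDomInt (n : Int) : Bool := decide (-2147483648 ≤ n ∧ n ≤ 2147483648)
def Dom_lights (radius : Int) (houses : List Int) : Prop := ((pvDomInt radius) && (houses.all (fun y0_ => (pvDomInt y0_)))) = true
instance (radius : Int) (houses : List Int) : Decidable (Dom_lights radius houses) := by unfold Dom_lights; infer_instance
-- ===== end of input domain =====

-- B replaces A's repeated scan-and-remove passes by one forward pass over the
-- unmodified list that keeps the chosen light positions (alternative algorithm).
-- A empties the list `houses` in place; B does not mutate it: the equivalence
-- proved here is about the RETURN value only.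

-- ===== PORT A =====
-- inner `for i in reversed(houses): if …: houses.remove(i)` ported over a
-- snapshot of the reversed list; `remove` = PySem.List.remove? (first occurrence).
def passLoop (radius position : Int) (iter houses : List Int) : List Int :=
  match iter with
  | [] => houses
  | i :: rest =>
    if (decide (position - radius ≤ i) && decide (i ≤ position + radius)) = true then
      passLoop radius position rest ((PySem.List.remove? houses i).getD houses)
    else
      passLoop radius position rest houses

-- the `while houses:` loop, with fuel = houses.length (each pass removes at least
-- houses[0] when 0 ≤ radius; for radius < 0 the Python loop diverges — outside Pre_)
def lightsGo (radius : Int) (fuel : Nat) (acc : Int) (houses : List Int) : Int :=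
  match fuel with
  | 0 => acc
  | fuel' + 1 =>
    match houses with
    | [] => acc
    | h0 :: _ =>
      let position := h0 + radius
      lightsGo radius fuel' (acc + 1) (passLoop radius position houses.reverse houses)

def lights (radius : Int) (houses : List Int) : Int :=
  lightsGo radius houses.length 0 houses

-- ===== PORT B =====
def coveredBy (span i : Int) (chosen : List Int) : Bool :=
  chosen.any (fun c => decide (c ≤ i) && decide (i ≤ c + span))

def lights_alt (radius : Int) (houses : List Int) : Int :=
  ((houses.foldl
      (fun chosen h => if coveredBy (2 * radius) h chosen then chosen else chosen ++ [h])
      ([] : List Int)).length : Int)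

-- ===== PRECONDITION & SPEC =====
-- Pre_ excludes only inputs on which the Python A never returns: for radius < 0 and
-- nonempty houses no house is ever removed and the while-loop diverges.
def Pre_lights (radius : Int) (houses : List Int) : Prop := houses = [] ∨ 0 ≤ radius
instance (radius : Int) (houses : List Int) : Decidable (Pre_lights radius houses) := by
  unfold Pre_lights; infer_instance

def pvWitness_lights : Int × List Int := (1, [0, 5, 10])

def Spec_lights (radius : Int) (houses : List Int) (out : Int) : Prop := out = lights_alt radius houses
instance (radius : Int) (houses : List Int) (out : Int) : Decidable (Spec_lights radius houses out) := by unfold Spec_lights; infer_instance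

-- ===== CLAIM (what is proved, stated in full; the proofs are below) =====
def Claim_equal_lights : Prop := ∀ (radius : Int) (houses : List Int), Dom_lights radius houses → Pre_lights radius houses → Spec_lights radius houses (lights radius houses)

-- ===== LEMMAS AND PROOFS =====

-- common spec: one light at the first house, recurse on the houses it does not cover
def specL (radius : Int) (l : List Int) : Int :=
  match l with
  | [] => 0
  | h :: t =>
      1 + specL radius (t.filter (fun i => !(decide (h ≤ i) && decide (i ≤ h + 2 * radius))))
termination_by l.length
decreasing_by
  simpa using Nat.lt_succ_of_le (by simpa using List.length_filter_le _ t.attach)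

theorem specL_nil (radius : Int) : specL radius [] = 0 := by
  rw [specL.eq_def]

theorem specL_cons (radius h : Int) (t : List Int) :
    specL radius (h :: t)
      = 1 + specL radius (t.filter (fun i => !(decide (h ≤ i) && decide (i ≤ h + 2 * radius)))) := by
  rw [specL.eq_def]

theorem filter_erase_of_neg (p : Int → Bool) (v : Int) (hp : p v = false) :
    ∀ l : List Int, (l.erase v).filter p = l.filter p := by
  intro l
  induction l with
  | nil => simp
  | cons x t ih =>
    by_cases hx : x = v
    · subst hx; simp [List.erase_cons_head, List.filter_cons, hp]
    · rw [List.erase_cons_tail (by simpa using hx)]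
      simp only [List.filter_cons]
      by_cases hpx : p x = true
      · simp [hpx, ih]
      · simp [Bool.eq_false_iff.mpr hpx, ih]

theorem passLoop_eq_filter (radius position : Int) :
    ∀ (iter houses : List Int),
      (∀ v, (decide (position - radius ≤ v) && decide (v ≤ position + radius)) = true →
        iter.count v = houses.count v) →
      passLoop radius position iter houses
        = houses.filter (fun i => !(decide (position - radius ≤ i) && decide (i ≤ position + radius))) := by
  intro iter
  induction iter with
  | nil =>
    intro houses hcnt
    have : ∀ x ∈ houses,
        (!(decide (position - radius ≤ x) && decide (x ≤ position + radius))) = true := by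
      intro x hx
      cases hb : (decide (position - radius ≤ x) && decide (x ≤ position + radius)) with
      | false => simp
      | true =>
        have h0 := hcnt x hb
        simp only [List.count_nil] at h0
        have : 0 < houses.count x := List.count_pos_iff.mpr hx
        omega
    rw [passLoop]
    exact (List.filter_eq_self.mpr this).symm
  | cons i rest ih =>
    intro houses hcnt
    by_cases hc : (decide (position - radius ≤ i) && decide (i ≤ position + radius)) = true
    · -- i is removed
      have hmem : i ∈ houses := by
        have := hcnt i hc
        simp only [List.count_cons_self] at this
        exact List.count_pos_iff.mp (by omega)
      rw [passLoop, if_pos hc, PySem.List.remove?_eq_some_erase houses i hmem, Option.getD_some]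
      have hcnt' : ∀ v, (decide (position - radius ≤ v) && decide (v ≤ position + radius)) = true →
          rest.count v = (houses.erase i).count v := by
        intro v hv
        have h0 := hcnt v hv
        by_cases hvi : v = i
        · subst hvi
          rw [List.count_erase_self]
          simp only [List.count_cons_self] at h0
          omega
        · rw [List.count_erase_of_ne hvi]
          rw [← h0]
          simp [List.count_cons, Ne.symm hvi]
      rw [ih _ hcnt']
      exact filter_erase_of_neg _ i (by simp only [hc, Bool.not_true]) houses
    · -- i is skipped
      rw [passLoop, if_neg hc]
      refine ih houses ?_
      intro v hv
      have hvi : v ≠ i := by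
        intro h; subst h; exact hc hv
      rw [← hcnt v hv]
      simp [List.count_cons, Ne.symm hvi]

theorem lightsGo_eq (radius : Int) (hr : 0 ≤ radius) :
    ∀ (fuel : Nat) (houses : List Int) (acc : Int), houses.length ≤ fuel →
      lightsGo radius fuel acc houses = acc + specL radius houses := by
  intro fuel
  induction fuel with
  | zero =>
    intro houses acc hlen
    have : houses = [] := List.length_eq_zero_iff.mp (Nat.le_zero.mp hlen)
    subst this
    rw [lightsGo, specL_nil]
    ring
  | succ fuel' ih =>
    intro houses acc hlen
    match houses with
    | [] => rw [lightsGo, specL_nil]; ring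
    | h :: t =>
      have hpass : passLoop radius (h + radius) (h :: t).reverse (h :: t)
          = (h :: t).filter (fun i => !(decide (h + radius - radius ≤ i) && decide (i ≤ h + radius + radius))) := by
        refine passLoop_eq_filter radius (h + radius) (h :: t).reverse (h :: t) ?_
        intro v _
        exact List.count_reverse ..
      have hpred : (fun i => !(decide (h + radius - radius ≤ i) && decide (i ≤ h + radius + radius)))
          = (fun i => !(decide (h ≤ i) && decide (i ≤ h + 2 * radius))) := by
        funext i
        have e1 : h + radius - radius = h := by ring
        have e2 : h + radius + radius = h + 2 * radius := by ring
        rw [e1, e2]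
      have hcovh : (decide (h ≤ h) && decide (h ≤ h + 2 * radius)) = true := by
        simp; omega
      have hdrop : (h :: t).filter (fun i => !(decide (h ≤ i) && decide (i ≤ h + 2 * radius)))
          = t.filter (fun i => !(decide (h ≤ i) && decide (i ≤ h + 2 * radius))) := by
        simp only [List.filter_cons, hcovh]
        simp
      rw [lightsGo]
      simp only [hpass, hpred, hdrop]
      rw [ih _ (acc + 1)
        (le_trans (List.length_filter_le _ t) (by simpa using Nat.lt_succ_iff.mp (by simpa using hlen)))]
      rw [specL_cons]
      ring

theorem foldl_step_eq (radius : Int) (hr : 0 ≤ radius) :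
    ∀ (l chosen : List Int),
      ((l.foldl
          (fun chosen h => if coveredBy (2 * radius) h chosen then chosen else chosen ++ [h])
          chosen).length : Int)
        = (chosen.length : Int)
          + specL radius (l.filter (fun i => !(coveredBy (2 * radius) i chosen))) := by
  intro l
  induction l with
  | nil => intro chosen; simp [specL_nil]
  | cons h t ih =>
    intro chosen
    by_cases hc : coveredBy (2 * radius) h chosen = true
    · simp only [List.foldl_cons, List.filter_cons, hc]
      simpa using ih chosen
    · have hcb : coveredBy (2 * radius) h chosen = false := Bool.eq_false_iff.mpr hc
      simp only [List.foldl_cons, List.filter_cons, hcb, Bool.not_false, if_neg, cond_true,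
        Bool.false_eq_true, if_false, ite_true]
      rw [ih (chosen ++ [h])]
      have hfilt : t.filter (fun i => !(coveredBy (2 * radius) i (chosen ++ [h])))
          = (t.filter (fun i => !(coveredBy (2 * radius) i chosen))).filter
              (fun i => !(decide (h ≤ i) && decide (i ≤ h + 2 * radius))) := by
        rw [List.filter_filter]
        refine List.filter_congr ?_
        intro x _
        simp [coveredBy, List.any_append, Bool.and_comm]
      rw [specL_cons, hfilt]
      push_cast [List.length_append, List.length_singleton]
      ring

-- ===== VERDICT (by name: the statement is the Claim_ definition above) =====
theorem lights_spec : Claim_equal_lights := by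
  intro radius houses _ hpre
  unfold Spec_lights
  rcases hpre with hnil | hr
  · subst hnil
    simp [lights, lightsGo, lights_alt]
  · have hA := lightsGo_eq radius hr houses.length houses 0 le_rfl
    have hB := foldl_step_eq radius hr houses []
    unfold lights lights_alt
    rw [hA, hB]
    have : houses.filter (fun i => !(coveredBy (2 * radius) i [])) = houses := by
      refine List.filter_eq_self.mpr ?_
      intro x _
      simp [coveredBy]
    rw [this]
    simp
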